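-- pv_equiv track=rewrite | github.com/TumiLabsJN/rumiaifinal | rumiai_v2/contracts/validators.py | validate_mediapipe
-- ===== SOURCE A (Python) =====
-- def validate_mediapipe(output: dict) -> tuple[bool, str]:
--     """Validate MediaPipe human analysis output
--     Expected structure from: human_analysis_outputs/{id}_human_analysis.json
--     """
--     try:
--         # Check required top-level fields
--         required = ['poses', 'faces', 'hands', 'gestures', 'metadata']
--         for field in required:
--             if field not in output:
--                 return False, f"Missing field: {field}"
--
--         # Validate poses
--         for i, pose in enumerate(output.get('poses', [])):
--             if 'timestamp' not in pose:
--                 return False, f"Pose {i} missing timestamp"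
--             if 'landmarks' not in pose:
--                 return False, f"Pose {i} missing landmarks"
--             if pose['landmarks'] != 33:  # MediaPipe has 33 pose landmarks
--                 return False, f"Pose {i}: expected 33 landmarks, got {pose['landmarks']}"
--
--         # Validate faces
--         for i, face in enumerate(output.get('faces', [])):
--             if 'timestamp' not in face:
--                 return False, f"Face {i} missing timestamp"
--             if 'confidence' not in face:
--                 return False, f"Face {i} missing confidence"
--
--         # Validate hands
--         for i, hand in enumerate(output.get('hands', [])):
--             if 'timestamp' not in hand:
--                 return False, f"Hand {i} missing timestamp"
--             if 'count' not in hand: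
--                 return False, f"Hand {i} missing count"
--
--         return True, "Valid"
--
--     except Exception as e:
--         return False, f"Validation error: {e}"
-- ===== SOURCE B (Python) =====
-- _REQUIRED = ['poses', 'faces', 'hands', 'gestures', 'metadata']
--
--
-- def _pose_errors(i, pose):
--     errs = []
--     if 'timestamp' not in pose:
--         errs.append(f"Pose {i} missing timestamp")
--     if 'landmarks' not in pose:
--         errs.append(f"Pose {i} missing landmarks")
--     elif pose['landmarks'] != 33:
--         errs.append(f"Pose {i}: expected 33 landmarks, got {pose['landmarks']}")
--     return errs
--
--
-- def _pair_errors(label, i, item, second):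
--     errs = []
--     if 'timestamp' not in item:
--         errs.append(f"{label} {i} missing timestamp")
--     if second not in item:
--         errs.append(f"{label} {i} missing {second}")
--     return errs
--
--
-- def validate_mediapipe(output: dict) -> tuple[bool, str]:
--     """Validate MediaPipe output: collect the full error report, return the first error."""
--     try:
--         errors = [f"Missing field: {f}" for f in _REQUIRED if f not in output]
--         for i, pose in enumerate(output.get('poses', [])):
--             errors += _pose_errors(i, pose)
--         for i, face in enumerate(output.get('faces', [])):
--             errors += _pair_errors('Face', i, face, 'confidence')
--         for i, hand in enumerate(output.get('hands', [])):
--             errors += _pair_errors('Hand', i, hand, 'count')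
--         return (False, errors[0]) if errors else (True, "Valid")
--     except Exception as e:
--         return False, f"Validation error: {e}"
-- ===== Notes on version B (the rewrite author's own statement) =====
-- stated objective: alternative
-- what changed: A short-circuits returning on the first failed check; B runs to completion with no early exits, accumulating the complete list of error messages from staged passes (missing top-level fields, then per-pose/face/hand errors) and returning the first element of that list.
import Mathlib
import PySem

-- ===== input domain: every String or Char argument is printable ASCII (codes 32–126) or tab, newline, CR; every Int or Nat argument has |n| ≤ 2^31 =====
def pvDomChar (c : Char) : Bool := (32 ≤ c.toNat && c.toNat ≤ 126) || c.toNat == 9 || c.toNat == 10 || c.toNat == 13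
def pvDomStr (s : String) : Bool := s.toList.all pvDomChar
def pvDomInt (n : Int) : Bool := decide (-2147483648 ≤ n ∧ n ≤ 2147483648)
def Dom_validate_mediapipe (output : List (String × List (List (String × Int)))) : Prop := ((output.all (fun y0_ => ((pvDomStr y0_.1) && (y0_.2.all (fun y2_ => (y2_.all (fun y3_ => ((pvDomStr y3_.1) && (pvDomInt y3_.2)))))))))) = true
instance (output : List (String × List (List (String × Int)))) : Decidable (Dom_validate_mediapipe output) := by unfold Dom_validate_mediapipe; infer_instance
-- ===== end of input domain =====

-- B replaces A's early-returning checks by exhaustively collecting the full error list in staged passes and returning its first element (objective: alternative).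


-- ===== PORT A =====
-- A: loop over the required top-level fields, returning on the first missing one
def aRequired (d : PySem.Dict String (List (List (String × Int)))) : List String → Option String
  | [] => none
  | f :: rest => if d.contains f = false then some ("Missing field: " ++ f) else aRequired d rest

-- A: 'for i, pose in enumerate(output.get('poses', []))' with early returns
def aPoses : Nat → List (List (String × Int)) → Option String
  | _, [] => none
  | i, p :: rest =>
    let pose := PySem.Dict.ofList p
    if pose.contains "timestamp" = false then
      some ("Pose " ++ PySem.Int.toStr i ++ " missing timestamp")
    else
      match pose.get? "landmarks" with
      | none => some ("Pose " ++ PySem.Int.toStr i ++ " missing landmarks")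
      | some v =>
        if v ≠ 33 then
          some ("Pose " ++ PySem.Int.toStr i ++ ": expected 33 landmarks, got " ++ PySem.Int.toStr v)
        else aPoses (i + 1) rest

-- A: 'for i, face in enumerate(output.get('faces', []))'
def aFaces : Nat → List (List (String × Int)) → Option String
  | _, [] => none
  | i, f :: rest =>
    let face := PySem.Dict.ofList f
    if face.contains "timestamp" = false then
      some ("Face " ++ PySem.Int.toStr i ++ " missing timestamp")
    else if face.contains "confidence" = false then
      some ("Face " ++ PySem.Int.toStr i ++ " missing confidence")
    else aFaces (i + 1) rest

-- A: 'for i, hand in enumerate(output.get('hands', []))'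
def aHands : Nat → List (List (String × Int)) → Option String
  | _, [] => none
  | i, h :: rest =>
    let hand := PySem.Dict.ofList h
    if hand.contains "timestamp" = false then
      some ("Hand " ++ PySem.Int.toStr i ++ " missing timestamp")
    else if hand.contains "count" = false then
      some ("Hand " ++ PySem.Int.toStr i ++ " missing count")
    else aHands (i + 1) rest

def validate_mediapipe (output : List (String × List (List (String × Int)))) : Bool × String :=
  let d := PySem.Dict.ofList output
  match aRequired d ["poses", "faces", "hands", "gestures", "metadata"] with
  | some m => (false, m)
  | none =>
    match aPoses 0 (d.getD "poses" []) with
    | some m => (false, m)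
    | none =>
      match aFaces 0 (d.getD "faces" []) with
      | some m => (false, m)
      | none =>
        match aHands 0 (d.getD "hands" []) with
        | some m => (false, m)
        | none => (true, "Valid")

-- ===== PORT B =====
-- B: _pose_errors — all errors of one pose (no early exit)
def bPoseErrs (i : Nat) (p : List (String × Int)) : List String :=
  let pose := PySem.Dict.ofList p
  (if pose.contains "timestamp" = false then
     ["Pose " ++ PySem.Int.toStr i ++ " missing timestamp"] else []) ++
  (match pose.get? "landmarks" with
   | none => ["Pose " ++ PySem.Int.toStr i ++ " missing landmarks"]
   | some v =>
     if v ≠ 33 then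
       ["Pose " ++ PySem.Int.toStr i ++ ": expected 33 landmarks, got " ++ PySem.Int.toStr v]
     else [])

-- B: _pair_errors — all errors of one face/hand item
def bPairErrs (label : String) (i : Nat) (item : List (String × Int)) (second : String) : List String :=
  let d := PySem.Dict.ofList item
  (if d.contains "timestamp" = false then
     [label ++ " " ++ PySem.Int.toStr i ++ " missing timestamp"] else []) ++
  (if d.contains second = false then
     [label ++ " " ++ PySem.Int.toStr i ++ " missing " ++ second] else [])

-- B: 'for i, pose in enumerate(...): errors += _pose_errors(i, pose)'
def bPoseList : Nat → List (List (String × Int)) → List String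
  | _, [] => []
  | i, x :: rest => bPoseErrs i x ++ bPoseList (i + 1) rest

-- B: 'for i, item in enumerate(...): errors += _pair_errors(label, i, item, second)'
def bPairList (label second : String) : Nat → List (List (String × Int)) → List String
  | _, [] => []
  | i, x :: rest => bPairErrs label i x second ++ bPairList label second (i + 1) rest

def validate_mediapipe_alt (output : List (String × List (List (String × Int)))) : Bool × String :=
  let d := PySem.Dict.ofList output
  let errors :=
    ((["poses", "faces", "hands", "gestures", "metadata"].filter
        (fun f => !(d.contains f))).map (fun f => "Missing field: " ++ f)) ++
    bPoseList 0 (d.getD "poses" []) ++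
    bPairList "Face" "confidence" 0 (d.getD "faces" []) ++
    bPairList "Hand" "count" 0 (d.getD "hands" [])
  match errors with
  | [] => (true, "Valid")
  | e :: _ => (false, e)

-- ===== PRECONDITION & SPEC =====
def Spec_validate_mediapipe (output : List (String × List (List (String × Int)))) (out : Bool × String) : Prop := out = validate_mediapipe_alt output
instance (output : List (String × List (List (String × Int)))) (out : Bool × String) : Decidable (Spec_validate_mediapipe output out) := by unfold Spec_validate_mediapipe; infer_instance

-- ===== CLAIM (what is proved, stated in full; the proofs are below) =====
def Claim_equal_validate_mediapipe : Prop := ∀ (output : List (String × List (List (String × Int)))), Dom_validate_mediapipe output → Spec_validate_mediapipe output (validate_mediapipe output)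

-- ===== LEMMAS AND PROOFS =====

theorem required_eq (d : PySem.Dict String (List (List (String × Int)))) (fs : List String) :
    aRequired d fs =
      ((fs.filter (fun f => !(d.contains f))).map (fun f => "Missing field: " ++ f)).head? := by
  induction fs with
  | nil => rfl
  | cons f rest ih =>
    simp only [aRequired, List.filter_cons]
    by_cases h : d.contains f = false
    · simp [h]
    · simp only [Bool.not_eq_false] at h
      simp [h, ih]

theorem poses_eq (i : Nat) (xs : List (List (String × Int))) :
    aPoses i xs = (bPoseList i xs).head? := by
  induction xs generalizing i with
  | nil => rfl
  | cons x rest ih =>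
    simp only [aPoses, bPoseList, bPoseErrs]
    by_cases ht : (PySem.Dict.ofList x).contains "timestamp" = false
    · simp [ht]
    · simp only [Bool.not_eq_false] at ht
      simp only [ht]
      cases h : (PySem.Dict.ofList x).get? "landmarks" with
      | none => simp
      | some v =>
        by_cases hv : v = 33
        · simp [hv, ih]
        · simp [hv]

theorem faces_eq (i : Nat) (xs : List (List (String × Int))) :
    aFaces i xs = (bPairList "Face" "confidence" i xs).head? := by
  induction xs generalizing i with
  | nil => rfl
  | cons x rest ih =>
    simp only [aFaces, bPairList, bPairErrs]
    by_cases ht : (PySem.Dict.ofList x).contains "timestamp" = false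
    · simp [ht]
    · simp only [Bool.not_eq_false] at ht
      by_cases hc : (PySem.Dict.ofList x).contains "confidence" = false
      · simp [ht, hc, String.append_assoc]
      · simp only [Bool.not_eq_false] at hc
        simp [ht, hc, ih]

theorem hands_eq (i : Nat) (xs : List (List (String × Int))) :
    aHands i xs = (bPairList "Hand" "count" i xs).head? := by
  induction xs generalizing i with
  | nil => rfl
  | cons x rest ih =>
    simp only [aHands, bPairList, bPairErrs]
    by_cases ht : (PySem.Dict.ofList x).contains "timestamp" = false
    · simp [ht]
    · simp only [Bool.not_eq_false] at ht
      by_cases hc : (PySem.Dict.ofList x).contains "count" = false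
      · simp [ht, hc, String.append_assoc]
      · simp only [Bool.not_eq_false] at hc
        simp [ht, hc, ih]

-- ===== VERDICT (by name: the statement is the Claim_ definition above) =====
theorem validate_mediapipe_spec : Claim_equal_validate_mediapipe := by
  intro output _
  unfold Spec_validate_mediapipe validate_mediapipe validate_mediapipe_alt
  simp only [required_eq, poses_eq, faces_eq, hands_eq]
  set d := PySem.Dict.ofList output
  cases ((["poses", "faces", "hands", "gestures", "metadata"].filter
      (fun f => !(d.contains f))).map (fun f => "Missing field: " ++ f)) with
  | cons e t => rfl
  | nil =>
    cases bPoseList 0 (d.getD "poses" []) with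
    | cons e t => rfl
    | nil =>
      cases bPairList "Face" "confidence" 0 (d.getD "faces" []) with
      | cons e t => rfl
      | nil =>
        cases bPairList "Hand" "count" 0 (d.getD "hands" []) with
        | cons e t => rfl
        | nil => rfl
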